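-- pv_equiv track=rewrite | github.com/datysonjr/Affiliate-Whiz | src/pipelines/content/internal_links.py | _extract_matching_phrase
-- ===== SOURCE A (Python) =====
-- from typing import Any, Dict, List, Optional, Tuple
--
-- def _extract_matching_phrase(sentence: str, tokens: List[str]) -> str:
--     """Extract the best contiguous phrase matching the given tokens.
--
--     Parameters
--     ----------
--     sentence:
--         The original-case sentence.
--     tokens:
--         Lowercase tokens to match against.
--
--     Returns
--     -------
--     str
--         The extracted anchor phrase.
--     """
--     words = sentence.split()
--     best_start = 0
--     best_end = 0
--     best_count = 0
--
--     for i in range(len(words)):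
--         for j in range(i + 1, min(i + 6, len(words) + 1)):
--             phrase_words = [w.lower().strip(".,;:!?()\"'") for w in words[i:j]]
--             matches = sum(1 for pw in phrase_words if any(t in pw for t in tokens))
--             if matches > best_count:
--                 best_count = matches
--                 best_start = i
--                 best_end = j
--
--     if best_count > 0:
--         return " ".join(words[best_start:best_end])
--     return sentence.split()[0] if sentence.split() else ""
-- ===== SOURCE B (Python) =====
-- def _extract_matching_phrase(sentence, tokens):
--     words = sentence.split()
--     if not words:
--         return ""
--     strip_chars = ".,;:!?()\"'"
--     m = []
--     for w in words:
--         cw = w.lower().strip(strip_chars)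
--         m.append(1 if any(t in cw for t in tokens) else 0)
--     prefix = [0]
--     for x in m:
--         prefix.append(prefix[-1] + x)
--     n = len(words)
--     best_start = best_end = best_count = 0
--     for i in range(n):
--         for j in range(i + 1, min(i + 6, n + 1)):
--             c = prefix[j] - prefix[i]
--             if c > best_count:
--                 best_start, best_end, best_count = i, j, c
--     if best_count > 0:
--         return " ".join(words[best_start:best_end])
--     return words[0]
-- ===== Notes on version B (the rewrite author's own statement) =====
-- stated objective: alternative
-- what changed: B computes each word's cleaned token-match flag exactly once, builds prefix sums of these 0/1 flags, and scores every candidate window by a prefix-sum difference, instead of A's re-cleaning and re-scanning all words of every window against every token.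
import Mathlib
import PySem

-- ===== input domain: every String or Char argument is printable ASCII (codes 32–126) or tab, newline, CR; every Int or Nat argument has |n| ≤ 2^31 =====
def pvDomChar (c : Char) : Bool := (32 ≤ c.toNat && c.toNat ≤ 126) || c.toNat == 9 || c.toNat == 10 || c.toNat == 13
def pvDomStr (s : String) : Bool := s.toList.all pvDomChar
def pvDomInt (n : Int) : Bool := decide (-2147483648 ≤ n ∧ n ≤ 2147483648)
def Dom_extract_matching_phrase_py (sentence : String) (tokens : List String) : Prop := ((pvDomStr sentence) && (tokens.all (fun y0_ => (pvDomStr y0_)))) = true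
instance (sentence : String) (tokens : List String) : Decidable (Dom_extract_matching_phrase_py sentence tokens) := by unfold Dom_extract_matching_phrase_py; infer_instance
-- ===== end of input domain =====

-- B precomputes each word's cleaned token-match flag once and scores windows by prefix-sum
-- differences, instead of re-cleaning and re-scanning every word of every window (alternative).


-- ===== PORT A =====
-- w.lower().strip(".,;:!?()\"'")
def emClean (w : String) : String :=
  PySem.Str.stripChars (PySem.Str.lower w) ".,;:!?()\"'"

-- any(t in pw for t in tokens)
def emAnyTok (tokens : List String) (pw : String) : Bool :=
  tokens.any (fun t => PySem.Str.isIn t pw)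

def extract_matching_phrase_py (sentence : String) (tokens : List String) : String :=
  let words := PySem.Str.split₀ sentence
  let st : Nat × Nat × Nat :=
    (List.range words.length).foldl (fun st i =>
      (List.range' (i + 1) (min (i + 6) (words.length + 1) - (i + 1))).foldl (fun st j =>
        let phrase_words := ((words.drop i).take (j - i)).map emClean
        let mcount := phrase_words.countP (emAnyTok tokens)
        if mcount > st.2.2 then (i, j, mcount) else st) st)
      (0, 0, 0)
  if st.2.2 > 0 then
    PySem.Str.join " " ((words.drop st.1).take (st.2.1 - st.1))
  else
    match PySem.Str.split₀ sentence with
    | [] => ""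
    | w :: _ => w

-- ===== PORT B =====
def extract_matching_phrase_py_alt (sentence : String) (tokens : List String) : String :=
  let words := PySem.Str.split₀ sentence
  match words with
  | [] => ""
  | w0 :: _ =>
    let m : List Nat := words.map (fun w => if emAnyTok tokens (emClean w) then 1 else 0)
    let pre : List Nat := m.foldl (fun ps x => ps ++ [ps.getLastD 0 + x]) [0]
    let n := words.length
    let st : Nat × Nat × Nat :=
      (List.range n).foldl (fun st i =>
        (List.range' (i + 1) (min (i + 6) (n + 1) - (i + 1))).foldl (fun st j =>
          let c := pre.getD j 0 - pre.getD i 0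
          if c > st.2.2 then (i, j, c) else st) st)
        (0, 0, 0)
    if st.2.2 > 0 then
      PySem.Str.join " " ((words.drop st.1).take (st.2.1 - st.1))
    else w0

-- ===== PRECONDITION & SPEC =====
def Spec_extract_matching_phrase_py (sentence : String) (tokens : List String) (out : String) : Prop := out = extract_matching_phrase_py_alt sentence tokens
instance (sentence : String) (tokens : List String) (out : String) : Decidable (Spec_extract_matching_phrase_py sentence tokens out) := by unfold Spec_extract_matching_phrase_py; infer_instance

-- ===== CLAIM (what is proved, stated in full; the proofs are below) =====
def Claim_equal_extract_matching_phrase_py : Prop := ∀ (sentence : String) (tokens : List String), Dom_extract_matching_phrase_py sentence tokens → Spec_extract_matching_phrase_py sentence tokens (extract_matching_phrase_py sentence tokens)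

-- ===== LEMMAS AND PROOFS =====

-- running prefix sums as built by B's loop
def emScan (s : Nat) : List Nat → List Nat
  | [] => []
  | x :: xs => (s + x) :: emScan (s + x) xs

lemma emScan_getD (m : List Nat) : ∀ (s k : Nat), k < m.length →
    (emScan s m).getD k 0 = s + (m.take (k + 1)).sum := by
  induction m with
  | nil => intro s k h; simp at h
  | cons x xs ih =>
    intro s k h
    cases k with
    | zero => simp [emScan]
    | succ k =>
      simp only [emScan, List.getD_cons_succ, List.take_succ_cons, List.sum_cons]
      rw [ih (s + x) k (by simpa using h)]
      omega

lemma emFoldl_scan (m : List Nat) : ∀ (ps : List Nat),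
    m.foldl (fun ps x => ps ++ [ps.getLastD 0 + x]) ps = ps ++ emScan (ps.getLastD 0) m := by
  induction m with
  | nil => intro ps; simp [emScan]
  | cons x xs ih =>
    intro ps
    simp only [List.foldl_cons, emScan]
    rw [ih]
    simp

lemma emPre_getD (m : List Nat) (k : Nat) (hk : k ≤ m.length) :
    (m.foldl (fun ps x => ps ++ [ps.getLastD 0 + x]) [0]).getD k 0 = (m.take k).sum := by
  rw [emFoldl_scan]
  cases k with
  | zero => simp
  | succ k =>
    have hk' : k < m.length := by omega
    simp only [List.getLastD, List.getD, List.getElem?_cons_succ, List.cons_append,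
      List.nil_append]
    have : (0 :: emScan 0 m).getD (k + 1) 0 = (emScan 0 m).getD k 0 := by
      simp
    simpa [List.getD] using (emScan_getD m 0 k hk')

-- A's per-window count equals the sum of B's per-word flags over that window
lemma emCount_eq_sum (tokens : List String) (l : List String) :
    (l.map emClean).countP (emAnyTok tokens)
      = (l.map (fun w => if emAnyTok tokens (emClean w) then 1 else 0)).sum := by
  induction l with
  | nil => simp
  | cons w l ih =>
    by_cases h : emAnyTok tokens (emClean w) = true
    · simp [h, ih]; omega
    · simp [h, ih]

lemma emSum_slice (l : List Nat) (i j : Nat) (hij : i ≤ j) :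
    (l.take j).sum - (l.take i).sum = ((l.drop i).take (j - i)).sum := by
  rw [show j = i + (j - i) by omega, List.take_add]
  simp

-- ===== VERDICT (by name: the statement is the Claim_ definition above) =====
theorem extract_matching_phrase_py_spec : Claim_equal_extract_matching_phrase_py := by
  intro sentence tokens _
  unfold Spec_extract_matching_phrase_py extract_matching_phrase_py extract_matching_phrase_py_alt
  cases hw : PySem.Str.split₀ sentence with
  | nil => simp
  | cons w0 rest =>
    set words := w0 :: rest with hwords
    set f : String → Nat := fun w => if emAnyTok tokens (emClean w) then 1 else 0 with hf
    set m : List Nat := words.map f with hm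
    set pre : List Nat := m.foldl (fun ps x => ps ++ [ps.getLastD 0 + x]) [0] with hpre
    have hstates :
        (List.range words.length).foldl (fun st i =>
          (List.range' (i + 1) (min (i + 6) (words.length + 1) - (i + 1))).foldl (fun st j =>
            let phrase_words := ((words.drop i).take (j - i)).map emClean
            let mcount := phrase_words.countP (emAnyTok tokens)
            if mcount > st.2.2 then (i, j, mcount) else st) st)
          ((0, 0, 0) : Nat × Nat × Nat)
        = (List.range words.length).foldl (fun st i =>
          (List.range' (i + 1) (min (i + 6) (words.length + 1) - (i + 1))).foldl (fun st j =>
            let c := pre.getD j 0 - pre.getD i 0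
            if c > st.2.2 then (i, j, c) else st) st)
          ((0, 0, 0) : Nat × Nat × Nat) := by
      apply PySem.List.foldl_congr_mem
      intro st i hi
      apply PySem.List.foldl_congr_mem
      intro st' j hj
      have hi' : i < words.length := List.mem_range.mp hi
      have hj' : i + 1 ≤ j ∧ j < i + 1 + (min (i + 6) (words.length + 1) - (i + 1)) := by
        obtain ⟨k, hk1, hk2⟩ := List.mem_range'.mp hj
        omega
      have hij : i ≤ j := by omega
      have hjn : j ≤ words.length := by omega
      have hmlen : m.length = words.length := by rw [hm]; simp
      have hc : pre.getD j 0 - pre.getD i 0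
          = (((words.drop i).take (j - i)).map emClean).countP (emAnyTok tokens) := by
        rw [hpre, emPre_getD m j (by omega), emPre_getD m i (by omega),
          emSum_slice m i j hij, hm, ← List.map_drop, ← List.map_take,
          emCount_eq_sum tokens ((words.drop i).take (j - i)), hf]
      simp only [hc]
    simp only [hstates]
    rw [hpre, hm, hf, hwords]
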